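-- pv_equiv track=rewrite | github.com/ValterMed/algorithm_analysis | subconjuntos maximos.py | encontrar_subconjuntos_contiguos_maximos
-- ===== SOURCE A (Python) =====
-- def encontrar_subconjuntos_contiguos_maximos(conjunto):
--     subconjuntos_maximos = []
--     maximo_global = [0] * (len(conjunto) + 1)
--
--     for i in range(1, len(conjunto) + 1):
--         maximo_local = [0] * (len(conjunto) + 1)
--         for j in range(i, len(conjunto) + 1):
--             maximo_local[j] = max(maximo_local[j - 1] + conjunto[j - 1], conjunto[j - 1])
--             maximo_global[i] = max(maximo_global[i], maximo_local[j])
--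
--     maximo_global = max(maximo_global)
--
--     for i in range(len(conjunto)):
--         for j in range(i + 1, len(conjunto) + 1):
--             if maximo_global == sum(conjunto[i:j]):
--                 subconjuntos_maximos.append(conjunto[i:j])
--
--     return subconjuntos_maximos
--
-- conjunto = [32,23,32,-32434,1,14,34,12,342,124,14,532,523,-643,32,4,43,-6375,23,5,-65334,324,234,234,5,-531246,1,146,1561,13,415,1,-516,514,51,34,-634]
-- ===== SOURCE B (Python) =====
-- def encontrar_subconjuntos_contiguos_maximos(conjunto):
--     n = len(conjunto)
--     # prefix sums: pref[k] = sum of first k elements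
--     pref = [0]
--     for x in conjunto:
--         pref.append(pref[-1] + x)
--     # Kadane clamped at 0 (matches A: its running maximum starts at 0)
--     cur = 0
--     best = 0
--     for x in conjunto:
--         cur = max(0, cur) + x
--         best = max(best, cur)
--     return [conjunto[i:j]
--             for i in range(n)
--             for j in range(i + 1, n + 1)
--             if pref[j] - pref[i] == best]
-- ===== Notes on version B (the rewrite author's own statement) =====
-- stated objective: faster
-- what changed: B replaces A's O(n^2) family of row-by-row Kadane passes with one clamped-Kadane pass for the maximum subarray value and replaces A's per-slice re-summation in the collection loop with prefix sums for O(1) slice sums, giving O(n^2) total instead of O(n^3).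
import Mathlib
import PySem

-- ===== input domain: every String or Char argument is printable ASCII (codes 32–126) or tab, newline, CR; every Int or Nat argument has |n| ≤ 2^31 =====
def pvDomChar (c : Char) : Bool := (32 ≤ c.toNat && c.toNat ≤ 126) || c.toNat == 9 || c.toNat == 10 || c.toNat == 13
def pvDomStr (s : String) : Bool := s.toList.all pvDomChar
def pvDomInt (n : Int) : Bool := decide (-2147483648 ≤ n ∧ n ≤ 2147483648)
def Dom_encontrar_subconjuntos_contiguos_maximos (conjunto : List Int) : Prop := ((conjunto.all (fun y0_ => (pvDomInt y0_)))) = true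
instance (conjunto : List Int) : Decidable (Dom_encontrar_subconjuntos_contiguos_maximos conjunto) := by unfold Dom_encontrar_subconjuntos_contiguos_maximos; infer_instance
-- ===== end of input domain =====

-- B replaces A's O(n^3) triple work (a quadratic family of Kadane rows plus re-summing every
-- slice) by one clamped-Kadane pass for the maximum and prefix sums for O(1) slice sums: O(n^2) total.

-- ===== PORT A =====
-- literal transliteration of A; all list indices (j-1, j, i) lie in range on every input,
-- so the total forms pyGetD/pySetD are exact, and max(maximo_global) acts on a nonempty list
def encontrar_subconjuntos_contiguos_maximos (conjunto : List Int) : List (List Int) :=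
  let n : Int := conjunto.length
  let maximo_global : List Int := List.replicate (conjunto.length + 1) 0
  let maximo_global :=
    (PySem.List.pyRange 1 (n + 1)).foldl (fun maximo_global i =>
      let maximo_local : List Int := List.replicate (conjunto.length + 1) 0
      ((PySem.List.pyRange i (n + 1)).foldl (fun (st : List Int × List Int) j =>
        (PySem.List.pySetD st.1 j
            (max (PySem.List.pyGetD st.1 (j - 1) 0 + PySem.List.pyGetD conjunto (j - 1) 0)
                 (PySem.List.pyGetD conjunto (j - 1) 0)),
         PySem.List.pySetD st.2 i
            (max (PySem.List.pyGetD st.2 i 0)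
              (max (PySem.List.pyGetD st.1 (j - 1) 0 + PySem.List.pyGetD conjunto (j - 1) 0)
                   (PySem.List.pyGetD conjunto (j - 1) 0)))))
        (maximo_local, maximo_global)).2) maximo_global
  let maximo_global : Int := (PySem.List.max? maximo_global (fun y => y)).getD 0
  (PySem.List.pyRange 0 n).foldl (fun acc i =>
    (PySem.List.pyRange (i + 1) (n + 1)).foldl (fun acc j =>
      if maximo_global == (PySem.List.slice conjunto (some i) (some j)).sum
      then acc ++ [PySem.List.slice conjunto (some i) (some j)]
      else acc) acc) []

-- ===== PORT B =====
-- literal transliteration of Source B: prefix sums, one clamped-Kadane pass, then the comprehension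
def encontrar_subconjuntos_contiguos_maximos_alt (conjunto : List Int) : List (List Int) :=
  let n : Int := conjunto.length
  let pref : List Int :=
    conjunto.foldl (fun pr x => pr ++ [PySem.List.pyGetD pr (-1) 0 + x]) [0]
  let cb : Int × Int :=
    conjunto.foldl (fun p x => (max 0 p.1 + x, max p.2 (max 0 p.1 + x))) (0, 0)
  (PySem.List.pyRange 0 n).flatMap (fun i =>
    ((PySem.List.pyRange (i + 1) (n + 1)).filter (fun j =>
        PySem.List.pyGetD pref j 0 - PySem.List.pyGetD pref i 0 == cb.2)).map (fun j =>
      PySem.List.slice conjunto (some i) (some j)))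

-- ===== PRECONDITION & SPEC =====
def Spec_encontrar_subconjuntos_contiguos_maximos (conjunto : List Int) (out : List (List Int)) : Prop := out = encontrar_subconjuntos_contiguos_maximos_alt conjunto
instance (conjunto : List Int) (out : List (List Int)) : Decidable (Spec_encontrar_subconjuntos_contiguos_maximos conjunto out) := by unfold Spec_encontrar_subconjuntos_contiguos_maximos; infer_instance

-- ===== CLAIM (what is proved, stated in full; the proofs are below) =====
def Claim_equal_encontrar_subconjuntos_contiguos_maximos : Prop := ∀ (conjunto : List Int), Dom_encontrar_subconjuntos_contiguos_maximos conjunto → Spec_encontrar_subconjuntos_contiguos_maximos conjunto (encontrar_subconjuntos_contiguos_maximos conjunto)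

-- ===== LEMMAS AND PROOFS =====

-- A's inner-loop step written as A's port writes it
def pvRStep (p : Int × Int) (x : Int) : Int × Int :=
  (max (p.1 + x) x, max p.2 (max (p.1 + x) x))
-- B's Kadane step
def pvBStep (p : Int × Int) (x : Int) : Int × Int :=
  (max 0 p.1 + x, max p.2 (max 0 p.1 + x))
def pvBest (t : List Int) : Int := (t.foldl pvBStep (0, 0)).2

theorem pvRStep_eq_pvBStep : pvRStep = pvBStep := by
  funext p x
  unfold pvRStep pvBStep
  simp only [Prod.mk.injEq]
  constructor <;> omega

theorem pvBStep_fold_mono (t : List Int) :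
    ∀ p q : Int × Int, max 0 p.1 ≤ max 0 q.1 → p.2 ≤ q.2 →
      max 0 (t.foldl pvBStep p).1 ≤ max 0 (t.foldl pvBStep q).1 ∧
        (t.foldl pvBStep p).2 ≤ (t.foldl pvBStep q).2 := by
  induction t with
  | nil => exact fun p q h1 h2 => ⟨h1, h2⟩
  | cons x t ih =>
    intro p q h1 h2
    simp only [List.foldl_cons]
    exact ih _ _ (by simp only [pvBStep]; omega) (by simp only [pvBStep]; omega)

theorem pvBStep_fold_snd_le (t : List Int) :
    ∀ p : Int × Int, p.2 ≤ (t.foldl pvBStep p).2 := by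
  induction t with
  | nil => exact fun p => le_rfl
  | cons x t ih =>
    intro p
    simp only [List.foldl_cons]
    exact le_trans (by simp only [pvBStep]; omega) (ih (pvBStep p x))

theorem pvBest_nonneg (t : List Int) : 0 ≤ pvBest t := pvBStep_fold_snd_le t (0, 0)

theorem pvBest_le_cons (x : Int) (t : List Int) : pvBest t ≤ pvBest (x :: t) := by
  unfold pvBest
  simp only [List.foldl_cons]
  exact (pvBStep_fold_mono t (0, 0) (pvBStep (0, 0) x)
    (by simp only [pvBStep]; omega) (by simp only [pvBStep]; omega)).2

theorem pvBest_drop_le (t : List Int) : ∀ k : Nat, pvBest (t.drop k) ≤ pvBest t := by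
  induction t with
  | nil => intro k; simp
  | cons x t ih =>
    intro k
    cases k with
    | zero => simp
    | succ k =>
      simp only [List.drop_succ_cons]
      exact le_trans (ih k) (pvBest_le_cons x t)

theorem foldl_max_le (l : List Int) : ∀ z M : Int, z ≤ M → (∀ x ∈ l, x ≤ M) →
    l.foldl max z ≤ M := by
  induction l with
  | nil => exact fun z M h _ => h
  | cons x l ih =>
    intro z M h hall
    simp only [List.foldl_cons]
    exact ih _ _ (by have := hall x (by simp); omega) (fun y hy => hall y (by simp [hy]))

theorem le_foldl_max_init (l : List Int) : ∀ z : Int, z ≤ l.foldl max z := by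
  induction l with
  | nil => exact fun z => le_rfl
  | cons x l ih =>
    intro z
    simp only [List.foldl_cons]
    exact le_trans (le_max_left _ _) (ih _)

theorem le_foldl_max_mem (l : List Int) : ∀ (z x : Int), x ∈ l → x ≤ l.foldl max z := by
  induction l with
  | nil => intro z x h; simp at h
  | cons y l ih =>
    intro z x h
    simp only [List.foldl_cons]
    rcases List.mem_cons.mp h with rfl | h
    · exact le_trans (le_max_right _ _) (le_foldl_max_init l _)
    · exact ih _ _ h

-- the inner row loop of A computes a clamped Kadane over the suffix, written into slot i
theorem pvInnerLemma (a : List Int) (i : Int) (h0 : 1 ≤ i) (hin : i ≤ (a.length : Int)) :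
    ∀ (k : Nat) (lo : Int), i ≤ lo → lo + k = (a.length : Int) + 1 →
    ∀ (ml mg : List Int) (c : Int), ml.length = a.length + 1 → mg.length = a.length + 1 →
      PySem.List.pyGetD ml (lo - 1) 0 = c →
      ((PySem.List.pyRange lo ((a.length : Int) + 1)).foldl (fun (st : List Int × List Int) j =>
        (PySem.List.pySetD st.1 j
            (max (PySem.List.pyGetD st.1 (j - 1) 0 + PySem.List.pyGetD a (j - 1) 0)
                 (PySem.List.pyGetD a (j - 1) 0)),
         PySem.List.pySetD st.2 i
            (max (PySem.List.pyGetD st.2 i 0)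
              (max (PySem.List.pyGetD st.1 (j - 1) 0 + PySem.List.pyGetD a (j - 1) 0)
                   (PySem.List.pyGetD a (j - 1) 0)))))
        (ml, mg)).2
      = PySem.List.pySetD mg i
          (((a.drop (lo - 1).toNat).foldl pvRStep (c, PySem.List.pyGetD mg i 0)).2) := by
  intro k
  induction k with
  | zero =>
    intro lo hilo hk ml mg c hml hmg hc
    have hlo : lo = (a.length : Int) + 1 := by omega
    subst hlo
    rw [PySem.List.pyRange_one_eq_nil le_rfl]
    simp only [List.foldl_nil]
    have hdrop : ((a.length : Int) + 1 - 1).toNat = a.length := by omega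
    rw [hdrop, List.drop_length]
    simp only [List.foldl_nil]
    have h0i : 0 ≤ i := by omega
    have hilen : i.toNat < mg.length := by omega
    rw [PySem.List.pySetD_of_nonneg _ _ h0i,
        PySem.List.pyGetD_eq_getElem _ _ h0i (by omega)]
    exact (List.set_getElem_self hilen).symm
  | succ k ih =>
    intro lo hilo hk ml mg c hml hmg hc
    have h1lo : 1 ≤ lo := by omega
    have h0lo : (0 : Int) ≤ lo - 1 := by omega
    have hlt : lo < (a.length : Int) + 1 := by omega
    have hlena : (lo - 1).toNat < a.length := by omega
    have h0i : (0 : Int) ≤ i := by omega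
    have hiltn : i.toNat < a.length + 1 := by omega
    rw [PySem.List.pyRange_one_cons hlt]
    simp only [List.foldl_cons]
    rw [ih (lo + 1) (by omega) (by omega)
      (PySem.List.pySetD ml lo
        (max (PySem.List.pyGetD ml (lo - 1) 0 + PySem.List.pyGetD a (lo - 1) 0)
             (PySem.List.pyGetD a (lo - 1) 0)))
      (PySem.List.pySetD mg i
        (max (PySem.List.pyGetD mg i 0)
          (max (PySem.List.pyGetD ml (lo - 1) 0 + PySem.List.pyGetD a (lo - 1) 0)
               (PySem.List.pyGetD a (lo - 1) 0))))
      (max (PySem.List.pyGetD ml (lo - 1) 0 + PySem.List.pyGetD a (lo - 1) 0)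
           (PySem.List.pyGetD a (lo - 1) 0))
      (by rw [PySem.List.length_pySetD]; exact hml)
      (by rw [PySem.List.length_pySetD]; exact hmg)
      (by
        have h : lo + 1 - 1 = lo := by ring
        rw [h, PySem.List.pySetD_of_nonneg _ _ (by omega : (0:Int) ≤ lo),
            PySem.List.pyGetD_eq_getElem _ _ (by omega : (0:Int) ≤ lo)
              (by simp only [List.length_set]; omega)]
        exact List.getElem_set_self (by simp only [List.length_set]; omega))]
    -- rewrite the written slot and collapse the two writes to slot i
    rw [show PySem.List.pyGetD
          (PySem.List.pySetD mg i
            (max (PySem.List.pyGetD mg i 0)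
              (max (PySem.List.pyGetD ml (lo - 1) 0 + PySem.List.pyGetD a (lo - 1) 0)
                   (PySem.List.pyGetD a (lo - 1) 0)))) i 0
        = max (PySem.List.pyGetD mg i 0)
            (max (PySem.List.pyGetD ml (lo - 1) 0 + PySem.List.pyGetD a (lo - 1) 0)
                 (PySem.List.pyGetD a (lo - 1) 0)) from by
      rw [PySem.List.pySetD_of_nonneg _ _ h0i,
          PySem.List.pyGetD_eq_getElem _ _ h0i (by simp only [List.length_set]; omega)]
      exact List.getElem_set_self (by simp only [List.length_set]; omega)]
    rw [PySem.List.pySetD_of_nonneg _ _ h0i, PySem.List.pySetD_of_nonneg _ _ h0i,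
        PySem.List.pySetD_of_nonneg _ _ h0i, List.set_set]
    congr 1
    have hxa : PySem.List.pyGetD a (lo - 1) 0 = a[(lo - 1).toNat] :=
      PySem.List.pyGetD_eq_getElem _ _ h0lo (by omega)
    have hdrop : a.drop (lo - 1).toNat = a[(lo - 1).toNat] :: a.drop ((lo - 1).toNat + 1) :=
      List.drop_eq_getElem_cons hlena
    rw [hdrop, List.foldl_cons, hc, hxa]
    have hidx : (lo + 1 - 1).toNat = (lo - 1).toNat + 1 := by omega
    rw [hidx]
    rfl

-- the outer loop fills slot m (1 ≤ m ≤ n) with the Kadane value of the suffix drop (m-1)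
theorem pvOuterLemma (a : List Int) :
    ∀ (k : Nat) (lo : Int), 1 ≤ lo → lo + k = (a.length : Int) + 1 →
    ∀ (mg : List Int), mg.length = a.length + 1 →
      ((PySem.List.pyRange lo ((a.length : Int) + 1)).foldl (fun maximo_global i =>
        ((PySem.List.pyRange i ((a.length : Int) + 1)).foldl (fun (st : List Int × List Int) j =>
          (PySem.List.pySetD st.1 j
              (max (PySem.List.pyGetD st.1 (j - 1) 0 + PySem.List.pyGetD a (j - 1) 0)
                   (PySem.List.pyGetD a (j - 1) 0)),
           PySem.List.pySetD st.2 i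
              (max (PySem.List.pyGetD st.2 i 0)
                (max (PySem.List.pyGetD st.1 (j - 1) 0 + PySem.List.pyGetD a (j - 1) 0)
                     (PySem.List.pyGetD a (j - 1) 0)))))
          (List.replicate (a.length + 1) 0, maximo_global)).2) mg).length = a.length + 1 ∧
      ∀ m : Nat, m < a.length + 1 →
        PySem.List.pyGetD ((PySem.List.pyRange lo ((a.length : Int) + 1)).foldl (fun maximo_global i =>
          ((PySem.List.pyRange i ((a.length : Int) + 1)).foldl (fun (st : List Int × List Int) j =>
            (PySem.List.pySetD st.1 j
                (max (PySem.List.pyGetD st.1 (j - 1) 0 + PySem.List.pyGetD a (j - 1) 0)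
                     (PySem.List.pyGetD a (j - 1) 0)),
             PySem.List.pySetD st.2 i
                (max (PySem.List.pyGetD st.2 i 0)
                  (max (PySem.List.pyGetD st.1 (j - 1) 0 + PySem.List.pyGetD a (j - 1) 0)
                       (PySem.List.pyGetD a (j - 1) 0)))))
            (List.replicate (a.length + 1) 0, maximo_global)).2) mg) (m : Int) 0
        = if lo ≤ (m : Int) ∧ (m : Int) ≤ (a.length : Int)
          then ((a.drop (m - 1)).foldl pvRStep (0, PySem.List.pyGetD mg (m : Int) 0)).2
          else PySem.List.pyGetD mg (m : Int) 0 := by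
  intro k
  induction k with
  | zero =>
    intro lo h1lo hk mg hmg
    have hlo : lo = (a.length : Int) + 1 := by omega
    subst hlo
    rw [PySem.List.pyRange_one_eq_nil le_rfl]
    simp only [List.foldl_nil]
    refine ⟨hmg, fun m hm => ?_⟩
    rw [if_neg (by omega)]
  | succ k ih =>
    intro lo h1lo hk mg hmg
    have hlt : lo < (a.length : Int) + 1 := by omega
    have hlon : lo ≤ (a.length : Int) := by omega
    have hlonat : lo.toNat < mg.length := by omega
    rw [PySem.List.pyRange_one_cons hlt]
    simp only [List.foldl_cons]
    rw [pvInnerLemma a lo h1lo hlon (k + 1) lo le_rfl (by omega)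
      (List.replicate (a.length + 1) 0) mg 0 (by simp) hmg
      (by
        rw [PySem.List.pyGetD_eq_getElem _ _ (by omega : (0:Int) ≤ lo - 1)
          (by simp only [List.length_replicate]; omega)]
        exact List.getElem_replicate _)]
    obtain ⟨hlen', hval⟩ := ih (lo + 1) (by omega) (by omega)
      (PySem.List.pySetD mg lo
        (((a.drop (lo - 1).toNat).foldl pvRStep (0, PySem.List.pyGetD mg lo 0)).2))
      (by rw [PySem.List.length_pySetD]; exact hmg)
    refine ⟨hlen', fun m hm => ?_⟩
    rw [hval m hm]
    have hget : ∀ v : Int, PySem.List.pyGetD (PySem.List.pySetD mg lo v) (m : Int) 0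
        = if m = lo.toNat then v else PySem.List.pyGetD mg (m : Int) 0 := by
      intro v
      rw [show lo = ((lo.toNat : Nat) : Int) from (Int.toNat_of_nonneg (by omega)).symm]
      exact PySem.List.pyGetD_pySetD_natCast mg lo.toNat m v 0 (by omega)
    by_cases hm1 : m = lo.toNat
    · rw [if_neg (by omega), hget, if_pos hm1, if_pos (by constructor <;> omega)]
      have h1 : (lo - 1).toNat = m - 1 := by omega
      have h2 : ((m : Nat) : Int) = lo := by omega
      rw [h1, h2]
    · have hcond : ((lo + 1 ≤ (m : Int) ∧ (m : Int) ≤ (a.length : Int)) ↔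
          (lo ≤ (m : Int) ∧ (m : Int) ≤ (a.length : Int))) := by omega
      rw [hget, if_neg hm1]
      by_cases hc2 : lo ≤ (m : Int) ∧ (m : Int) ≤ (a.length : Int)
      · rw [if_pos (hcond.mpr hc2), if_pos hc2]
      · rw [if_neg (fun h => hc2 (hcond.mp h)), if_neg hc2]

-- A's computed maximum equals B's Kadane value
theorem pvMaxEq (a : List Int) :
    ((List.range a.length).map (fun m => pvBest (a.drop m))).foldl max 0 = pvBest a := by
  cases a with
  | nil => simp [pvBest]
  | cons x t =>
    apply le_antisymm
    · apply foldl_max_le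
      · exact pvBest_nonneg _
      · intro y hy
        simp only [List.mem_map, List.mem_range] at hy
        obtain ⟨m, hm, rfl⟩ := hy
        exact pvBest_drop_le _ m
    · have hmem : pvBest (x :: t) ∈
          (List.range (x :: t).length).map (fun m => pvBest ((x :: t).drop m)) :=
        List.mem_map.mpr ⟨0, by simp, by simp⟩
      exact le_foldl_max_mem _ 0 _ hmem

-- B's prefix-sum loop
theorem pvPrefFold : ∀ (a pr : List Int) (L : Int), pr.getLast? = some L →
    a.foldl (fun pr x => pr ++ [PySem.List.pyGetD pr (-1) 0 + x]) pr
      = pr ++ (List.range a.length).map (fun k => L + ((a.take (k + 1)).sum : Int)) := by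
  intro a
  induction a with
  | nil => intro pr L h; simp
  | cons x rest ih =>
    intro pr L h
    have hne : pr ≠ [] := by rintro rfl; simp at h
    have hL : PySem.List.pyGetD pr (-1) 0 = L := by
      rw [PySem.List.pyGetD_neg_one pr 0 hne]
      rw [List.getLast?_eq_some_getLast hne] at h
      exact Option.some_inj.mp h
    simp only [List.foldl_cons, hL]
    rw [ih (pr ++ [L + x]) (L + x) (by simp)]
    simp only [List.length_cons, List.range_succ_eq_map, List.map_cons, List.map_map,
      List.append_assoc, List.singleton_append]
    congr 2
    · simp
    · apply List.map_congr_left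
      intro k _
      simp [List.take_succ_cons]
      ring

theorem pvPrefGet (a : List Int) (j : Int) (h0 : 0 ≤ j) (h1 : j ≤ (a.length : Int)) :
    PySem.List.pyGetD (a.foldl (fun pr x => pr ++ [PySem.List.pyGetD pr (-1) 0 + x]) [0]) j 0
      = ((a.take j.toNat).sum : Int) := by
  rw [pvPrefFold a [0] 0 rfl]
  have hlen : ([(0 : Int)] ++ (List.range a.length).map
      (fun k => 0 + ((a.take (k + 1)).sum : Int))).length = a.length + 1 := by simp
  rw [PySem.List.pyGetD_eq_getElem _ 0 h0 (by rw [hlen]; omega)]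
  rcases Nat.eq_zero_or_eq_succ_pred j.toNat with hz | hs
  · simp [hz]
  · have hm : j.toNat - 1 < a.length := by omega
    rw [List.getElem_append_right (by simp; omega)]
    simp only [List.length_cons, List.length_nil, List.getElem_map, List.getElem_range]
    have : j.toNat - 1 + 1 = j.toNat := by omega
    simp [this]

theorem pvSliceSum (a : List Int) (i j : Int) (h0 : 0 ≤ i) (hij : i ≤ j) :
    ((PySem.List.slice a (some i) (some j)).sum : Int)
      = (a.take j.toNat).sum - (a.take i.toNat).sum := by
  rw [PySem.List.slice_toNat a h0 (le_trans h0 hij)]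
  have h : i.toNat ≤ j.toNat := Int.toNat_le_toNat hij
  have hadd := List.take_add (l := a) (i := i.toNat) (j := j.toNat - i.toNat)
  rw [Nat.add_sub_cancel' h] at hadd
  have hs := congrArg List.sum hadd
  rw [List.sum_append] at hs
  omega

-- ===== VERDICT (by name: the statement is the Claim_ definition above) =====
-- the final list held in maximo_global, as an explicit list
theorem pvMgList (a : List Int) :
    ((PySem.List.pyRange 1 ((a.length : Int) + 1)).foldl (fun maximo_global i =>
        ((PySem.List.pyRange i ((a.length : Int) + 1)).foldl (fun (st : List Int × List Int) j =>
          (PySem.List.pySetD st.1 j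
              (max (PySem.List.pyGetD st.1 (j - 1) 0 + PySem.List.pyGetD a (j - 1) 0)
                   (PySem.List.pyGetD a (j - 1) 0)),
           PySem.List.pySetD st.2 i
              (max (PySem.List.pyGetD st.2 i 0)
                (max (PySem.List.pyGetD st.1 (j - 1) 0 + PySem.List.pyGetD a (j - 1) 0)
                     (PySem.List.pyGetD a (j - 1) 0)))))
          (List.replicate (a.length + 1) 0, maximo_global)).2)
        (List.replicate (a.length + 1) 0))
      = 0 :: (List.range a.length).map (fun m => pvBest (a.drop m)) := by
  obtain ⟨hlen, hval⟩ := pvOuterLemma a a.length 1 le_rfl (by omega)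
    (List.replicate (a.length + 1) 0) (by simp)
  apply List.ext_getElem (by rw [hlen]; simp)
  intro m hm1 hm2
  have hmn : m < a.length + 1 := by rwa [hlen] at hm1
  have hgetm := hval m hmn
  rw [PySem.List.pyGetD_eq_getElem _ _ (by omega) (by omega)] at hgetm
  simp only [Int.toNat_natCast] at hgetm
  rw [hgetm]
  cases m with
  | zero =>
    rw [if_neg (by omega)]
    simp [PySem.List.pyGetD_zero]
  | succ m =>
    rw [if_pos (by constructor <;> [omega; (simp at hm2; omega)])]
    rw [PySem.List.pyGetD_eq_getElem _ _ (by omega) (by simp; omega)]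
    simp only [Int.toNat_natCast, List.getElem_replicate, List.getElem_cons_succ,
      List.getElem_map, List.getElem_range, Nat.add_sub_cancel]
    rw [pvRStep_eq_pvBStep]
    rfl

theorem encontrar_subconjuntos_contiguos_maximos_spec : Claim_equal_encontrar_subconjuntos_contiguos_maximos := by
  intro conjunto _
  unfold Spec_encontrar_subconjuntos_contiguos_maximos
  unfold encontrar_subconjuntos_contiguos_maximos encontrar_subconjuntos_contiguos_maximos_alt
  dsimp only
  rw [pvMgList conjunto, PySem.List.max?_id_cons]
  rw [show ((some (((List.range conjunto.length).map (fun m => pvBest (conjunto.drop m))).foldl max 0)).getD 0) = pvBest conjunto from by rw [Option.getD_some, pvMaxEq]]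
  simp only [PySem.List.foldl_append_if, PySem.List.foldl_append_eq_flatMap, List.nil_append]
  apply List.flatMap_congr
  intro i hi
  obtain ⟨hi0, hin⟩ := PySem.List.mem_pyRange_one.mp hi
  congr 1
  apply List.filter_congr
  intro j hj
  obtain ⟨hj1, hjn⟩ := PySem.List.mem_pyRange_one.mp hj
  have hij : i ≤ j := by omega
  have hcb : (conjunto.foldl (fun p x => (max 0 p.1 + x, max p.2 (max 0 p.1 + x)))
      ((0 : Int), (0 : Int))).2 = pvBest conjunto := rfl
  rw [hcb, pvSliceSum conjunto i j hi0 hij,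
      pvPrefGet conjunto j (by omega) (by omega),
      pvPrefGet conjunto i (by omega) (by omega),
      show (pvBest conjunto == (List.take j.toNat conjunto).sum - (List.take i.toNat conjunto).sum)
        = ((List.take j.toNat conjunto).sum - (List.take i.toNat conjunto).sum == pvBest conjunto) from by
        simp [eq_comm]]
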